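-- pv_equiv track=rewrite | github.com/KIM3310/stage-pilot | experiments/prompt-bfcl-ralph-matrix/run_prompt_bfcl_ralph_matrix.py | extract_failure_message
-- ===== SOURCE A (Python) =====
-- def extract_failure_message(stdout: str, stderr: str) -> str:
--     def cleaned_lines(text: str) -> list[str]:
--         return [line.strip() for line in text.splitlines() if line.strip()]
--
--     stderr_lines = cleaned_lines(stderr)
--     stdout_lines = cleaned_lines(stdout)
--     if not stderr_lines and not stdout_lines:
--         return "child process failed without output"
--
--     priority_markers = [
--         "missing required env vars",
--         "incorrect api key",
--         '"message":',
--         "api precheck failed",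
--         "http ",
--         "timed out",
--         "unauthorized",
--         "invalid",
--         "traceback",
--         "exception",
--         "failed",
--         "error",
--     ]
--
--     for marker in priority_markers:
--         for lines in (list(reversed(stderr_lines)), list(reversed(stdout_lines))):
--             for line in lines:
--                 if marker in line.lower():
--                     return line[-400:]
--
--     if stderr_lines:
--         return stderr_lines[-1][-400:]
--     return stdout_lines[-1][-400:]
-- ===== SOURCE B (Python) =====
-- def extract_failure_message(stdout: str, stderr: str) -> str:
--     priority_markers = [
--         "missing required env vars",
--         "incorrect api key",
--         '"message":',
--         "api precheck failed",
--         "http ",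
--         "timed out",
--         "unauthorized",
--         "invalid",
--         "traceback",
--         "exception",
--         "failed",
--         "error",
--     ]
--
--     def cleaned_lines(text: str) -> list[str]:
--         return [line.strip() for line in text.splitlines() if line.strip()]
--
--     candidates = list(reversed(cleaned_lines(stderr))) + list(reversed(cleaned_lines(stdout)))
--     if not candidates:
--         return "child process failed without output"
--
--     best_rank = None
--     best_line = candidates[0]
--     for line in candidates:
--         low = line.lower()
--         rank = len(priority_markers)
--         for i, marker in enumerate(priority_markers):
--             if marker in low:
--                 rank = i
--                 break
--         if best_rank is None or rank < best_rank:
--             best_rank = rank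
--             best_line = line
--     return best_line[-400:]
-- ===== Notes on version B (the rewrite author's own statement) =====
-- stated objective: alternative
-- what changed: A's marker-major triple loop (for each marker scan reversed stderr then reversed stdout) is replaced by one pass over the combined reversed candidate list that computes each line's first-matching-marker rank and keeps the line with the strictly lowest rank, the unmatched-rank sentinel making the fallback the first candidate.
import Mathlib
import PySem

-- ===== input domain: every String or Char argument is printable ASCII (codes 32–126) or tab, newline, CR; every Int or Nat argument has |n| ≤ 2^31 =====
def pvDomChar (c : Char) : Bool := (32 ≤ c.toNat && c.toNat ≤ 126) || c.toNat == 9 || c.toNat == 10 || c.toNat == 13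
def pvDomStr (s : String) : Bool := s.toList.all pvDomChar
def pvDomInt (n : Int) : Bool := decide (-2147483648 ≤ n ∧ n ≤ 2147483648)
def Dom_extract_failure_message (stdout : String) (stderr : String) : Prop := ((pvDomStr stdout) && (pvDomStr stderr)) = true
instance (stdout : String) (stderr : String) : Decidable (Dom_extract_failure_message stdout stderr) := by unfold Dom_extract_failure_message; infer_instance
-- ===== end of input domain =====

-- B replaces A's marker-major triple loop by a single pass over the combined candidate
-- list that keeps the line with the lowest marker rank (objective: alternative decomposition).

-- shared by both sources verbatim: the priority marker list and cleaned_lines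
def pvMarkers : List String :=
  ["missing required env vars", "incorrect api key", "\"message\":", "api precheck failed",
   "http ", "timed out", "unauthorized", "invalid", "traceback", "exception", "failed", "error"]

def pvCleanedLines (text : String) : List String :=
  ((PySem.Str.splitlines text).filter (fun line => PySem.Str.strip line ≠ "")).map
    (fun line => PySem.Str.strip line)

-- ===== PORT A =====
-- inner 'for line in lines: if marker in line.lower(): return line'
def pvFindIn (marker : String) (ls : List String) : Option String :=
  ls.find? (fun line => PySem.Str.isIn marker (PySem.Str.lower line))

-- 'for marker in priority_markers: for lines in (reversed stderr, reversed stdout): …'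
def pvSearch : List String → List String → List String → Option String
  | [], _, _ => none
  | m :: ms, errR, outR =>
    match pvFindIn m errR with
    | some l => some l
    | none =>
      match pvFindIn m outR with
      | some l => some l
      | none => pvSearch ms errR outR

def extract_failure_message (stdout : String) (stderr : String) : String :=
  let stderr_lines := pvCleanedLines stderr
  let stdout_lines := pvCleanedLines stdout
  if stderr_lines = [] ∧ stdout_lines = [] then "child process failed without output"
  else
    match pvSearch pvMarkers stderr_lines.reverse stdout_lines.reverse with
    | some line => PySem.Str.slice line (some (-400)) none
    | none =>
      if stderr_lines ≠ [] then
        -- stderr_lines[-1]; .getD "" is unreachable (the list is nonempty here)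
        PySem.Str.slice ((PySem.List.pyGet? stderr_lines (-1)).getD "") (some (-400)) none
      else
        PySem.Str.slice ((PySem.List.pyGet? stdout_lines (-1)).getD "") (some (-400)) none

-- ===== PORT B =====
-- 'rank = len(markers); for i, marker in …: if marker in low: rank = i; break'
def pvRank : List String → String → Nat
  | [], _ => 0
  | m :: ms, low => if PySem.Str.isIn m low then 0 else pvRank ms low + 1

-- one step of B's loop body: keep (best_rank, best_line)
def pvStep (ms : List String) (acc : Option Nat × String) (line : String) : Option Nat × String :=
  let rank := pvRank ms (PySem.Str.lower line)
  match acc.1 with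
  | none => (some rank, line)
  | some br => if rank < br then (some rank, line) else acc

def extract_failure_message_alt (stdout : String) (stderr : String) : String :=
  let candidates := (pvCleanedLines stderr).reverse ++ (pvCleanedLines stdout).reverse
  match candidates with
  | [] => "child process failed without output"
  | c0 :: _ =>
    let best := candidates.foldl (pvStep pvMarkers) (none, c0)
    PySem.Str.slice best.2 (some (-400)) none

-- ===== PRECONDITION & SPEC =====
def Spec_extract_failure_message (stdout : String) (stderr : String) (out : String) : Prop := out = extract_failure_message_alt stdout stderr
instance (stdout : String) (stderr : String) (out : String) : Decidable (Spec_extract_failure_message stdout stderr out) := by unfold Spec_extract_failure_message; infer_instance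

-- ===== CLAIM (what is proved, stated in full; the proofs are below) =====
def Claim_equal_extract_failure_message : Prop := ∀ (stdout : String) (stderr : String), Dom_extract_failure_message stdout stderr → Spec_extract_failure_message stdout stderr (extract_failure_message stdout stderr)

-- ===== LEMMAS AND PROOFS =====

-- B's step with an explicit rank function (pvStep pvMarkers = pvStepOf (rank w.r.t. pvMarkers))
def pvStepOf (f : String → Nat) (acc : Option Nat × String) (line : String) : Option Nat × String :=
  match acc.1 with
  | none => (some (f line), line)
  | some br => if f line < br then (some (f line), line) else acc

theorem pvStep_eq (ms : List String) :
    pvStep ms = pvStepOf (fun l => pvRank ms (PySem.Str.lower l)) := rfl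

-- marker-major search over ONE combined candidate list
def pvSearchC (ms cs : List String) : Option String :=
  ms.findSome? (fun m => cs.find? (fun line => PySem.Str.isIn m (PySem.Str.lower line)))

theorem pvSearch_eq_searchC (ms errR outR : List String) :
    pvSearch ms errR outR = pvSearchC ms (errR ++ outR) := by
  induction ms with
  | nil => rfl
  | cons m ms ih =>
    simp only [pvSearch, pvFindIn, pvSearchC, List.findSome?_cons, List.find?_append]
    cases errR.find? (fun line => PySem.Str.isIn m (PySem.Str.lower line)) with
    | some l => rfl
    | none =>
      cases outR.find? (fun line => PySem.Str.isIn m (PySem.Str.lower line)) with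
      | some l => rfl
      | none => simpa [pvSearchC] using ih

-- once the best rank is 0, the fold never changes its state
theorem pvFold_zero_stay (f : String → Nat) (cs : List String) (s : String) :
    cs.foldl (pvStepOf f) (some 0, s) = (some 0, s) := by
  induction cs with
  | nil => rfl
  | cons c cs ih => simpa [pvStepOf] using ih

-- if some line has rank 0, the fold returns the FIRST such line
theorem pvFold_zero (f : String → Nat) (l : String) :
    ∀ (cs : List String) (acc : Option Nat × String),
      cs.find? (fun x => f x == 0) = some l → (∀ br ∈ acc.1, 1 ≤ br) →
      cs.foldl (pvStepOf f) acc = (some 0, l) := by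
  intro cs
  induction cs with
  | nil => intro acc h; simp at h
  | cons c cs ih =>
    intro acc hfind hinv
    by_cases hc : f c = 0
    · have hlc : c = l := by
        simp [hc] at hfind
        exact hfind
      have hstep : pvStepOf f acc c = (some 0, c) := by
        match acc, hinv with
        | (none, s), _ => simp [pvStepOf, hc]
        | (some br, s), hinv =>
          have h1 : 0 < br := hinv br rfl
          simp [pvStepOf, hc, h1]
      rw [List.foldl_cons, hstep, pvFold_zero_stay, hlc]
    · have hfind' : cs.find? (fun x => f x == 0) = some l := by
        simpa [List.find?_cons, hc] using hfind
      have hinv' : ∀ br ∈ (pvStepOf f acc c).1, 1 ≤ br := by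
        match acc with
        | (none, s) => simp [pvStepOf]; omega
        | (some br, s) =>
          intro b hb
          by_cases hlt : f c < br
          · simp [pvStepOf, hlt] at hb; omega
          · simp [pvStepOf, hlt] at hb
            exact hb ▸ hinv br rfl
      simpa [List.foldl_cons] using ih (pvStepOf f acc c) hfind' hinv'

-- shifting every rank by one does not change which line wins
theorem pvFold_shift (f : String → Nat) :
    ∀ (cs : List String) (b : Option Nat) (s : String),
      cs.foldl (pvStepOf fun x => f x + 1) (b.map (· + 1), s)
        = ((cs.foldl (pvStepOf f) (b, s)).1.map (· + 1), (cs.foldl (pvStepOf f) (b, s)).2) := by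
  intro cs
  induction cs with
  | nil => intro b s; rfl
  | cons c cs ih =>
    intro b s
    cases b with
    | none => simpa [pvStepOf] using ih (some (f c)) c
    | some br =>
      by_cases hlt : f c < br
      · simpa [pvStepOf, hlt] using ih (some (f c)) c
      · have : ¬ f c + 1 < br + 1 := by omega
        simpa [pvStepOf, hlt, this] using ih (some br) s

-- the fold only looks at ranks of members
theorem pvFold_congr (f g : String → Nat) :
    ∀ (cs : List String) (acc : Option Nat × String), (∀ x ∈ cs, f x = g x) →
      cs.foldl (pvStepOf f) acc = cs.foldl (pvStepOf g) acc := by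
  intro cs
  induction cs with
  | nil => intro _ _; rfl
  | cons c cs ih =>
    intro acc h
    have hc : f c = g c := h c (by simp)
    have hstep : pvStepOf f acc c = pvStepOf g acc c := by
      simp [pvStepOf, hc]
    rw [List.foldl_cons, List.foldl_cons, hstep,
      ih (pvStepOf g acc c) (fun x hx => h x (by simp [hx]))]

-- MAIN: B's single pass equals A's marker-major search (with first-candidate fallback)
theorem pvMain (ms : List String) (c0 : String) (rest : List String) :
    ((c0 :: rest).foldl (pvStepOf fun l => pvRank ms (PySem.Str.lower l)) (none, c0)).2
      = (pvSearchC ms (c0 :: rest)).getD c0 := by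
  induction ms with
  | nil =>
    have h := pvFold_zero (fun _ => (0 : Nat)) c0 (c0 :: rest) (none, c0)
      (by simp) (by simp)
    simp only [pvRank] at *
    rw [h]
    simp [pvSearchC]
  | cons m ms ih =>
    have hpred : (fun x => pvRank (m :: ms) (PySem.Str.lower x) == 0)
        = (fun x => PySem.Str.isIn m (PySem.Str.lower x)) := by
      funext x
      have hr : pvRank (m :: ms) (PySem.Str.lower x)
          = if PySem.Str.isIn m (PySem.Str.lower x) = true then 0
            else pvRank ms (PySem.Str.lower x) + 1 := rfl
      show (pvRank (m :: ms) (PySem.Str.lower x) == 0) = PySem.Str.isIn m (PySem.Str.lower x)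
      rw [hr]
      cases hx : PySem.Str.isIn m (PySem.Str.lower x) <;> simp
    cases hfind : (c0 :: rest).find? (fun line => PySem.Str.isIn m (PySem.Str.lower line)) with
    | some l =>
      have h := pvFold_zero (fun l => pvRank (m :: ms) (PySem.Str.lower l)) l (c0 :: rest)
        (none, c0) (by rw [hpred]; exact hfind) (by simp)
      rw [h]
      simp only [pvSearchC, List.findSome?_cons, hfind, Option.getD_some]
    | none =>
      have hmem : ∀ x ∈ (c0 :: rest), PySem.Str.isIn m (PySem.Str.lower x) = false := by
        intro x hx
        have h := List.find?_eq_none.mp hfind x hx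
        exact Bool.eq_false_iff.mpr h
      have hcongr := pvFold_congr (fun l => pvRank (m :: ms) (PySem.Str.lower l))
        (fun l => pvRank ms (PySem.Str.lower l) + 1) (c0 :: rest) (none, c0)
        (by intro x hx
            have hr : pvRank (m :: ms) (PySem.Str.lower x)
                = if PySem.Str.isIn m (PySem.Str.lower x) = true then 0
                  else pvRank ms (PySem.Str.lower x) + 1 := rfl
            show pvRank (m :: ms) (PySem.Str.lower x) = pvRank ms (PySem.Str.lower x) + 1
            rw [hr, hmem x hx]
            simp)
      have hshift := pvFold_shift (fun l => pvRank ms (PySem.Str.lower l)) (c0 :: rest) none c0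
      simp only [Option.map_none] at hshift
      rw [hcongr, hshift, ih]
      simp only [pvSearchC, List.findSome?_cons, hfind]

theorem pvGet_neg_one (xs : List String) : PySem.List.pyGet? xs (-1) = xs.getLast? := by
  cases xs with
  | nil => rfl
  | cons x xs =>
    simp [PySem.List.pyGet?, PySem.List.pyIdx?, List.getLast?_eq_getElem?]

-- ===== VERDICT (by name: the statement is the Claim_ definition above) =====
theorem extract_failure_message_spec : Claim_equal_extract_failure_message := by
  intro stdout stderr _
  unfold Spec_extract_failure_message extract_failure_message extract_failure_message_alt
  set e := pvCleanedLines stderr with he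
  set o := pvCleanedLines stdout with ho
  cases hcs : e.reverse ++ o.reverse with
  | nil =>
    have hee : e = [] ∧ o = [] := by
      have h := List.append_eq_nil_iff.mp hcs
      exact ⟨List.reverse_eq_nil_iff.mp h.1, List.reverse_eq_nil_iff.mp h.2⟩
    simp [hee.1, hee.2]
  | cons c0 rest =>
    have hne : ¬ (e = [] ∧ o = []) := by
      rintro ⟨h1, h2⟩; simp [h1, h2] at hcs
    simp only [hne, if_false, pvSearch_eq_searchC, hcs, pvStep_eq]
    rw [pvMain]
    cases hs : pvSearchC pvMarkers (c0 :: rest) with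
    | some l => simp
    | none =>
      simp only [Option.getD_none]
      by_cases hee : e = []
      · have hoe : o ≠ [] := by
          intro h; exact hne ⟨hee, h⟩
        have : o.reverse = c0 :: rest := by simpa [hee] using hcs
        have hco : o.getLast? = some c0 := by
          rw [← List.head?_reverse, this]; rfl
        simp [hee, pvGet_neg_one, hco]
      · have : e.reverse.head? = some c0 := by
          cases her : e.reverse with
          | nil => simp [List.reverse_eq_nil_iff] at her; exact absurd her hee
          | cons a b => rw [her] at hcs; simp at hcs; simp [hcs.1]
        have hce : e.getLast? = some c0 := by rw [← List.head?_reverse, this]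
        simp [hee, pvGet_neg_one, hce]
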